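-- pv_equiv track=rewrite | github.com/TheAxiomFoundation/atlas | src/axiom_corpus/corpus/regulation_completion.py | _looks_statewide_regulation_version
-- ===== SOURCE A (Python) =====
-- def _looks_statewide_regulation_version(version: str) -> bool:
--     """Date-only release versions denote complete jurisdiction-wide regulation corpora."""
--
--     parts = version.split("-")
--     return (
--         len(parts) == 3
--         and len(parts[0]) == 4
--         and len(parts[1]) == 2
--         and len(parts[2]) == 2
--         and all(part.isdigit() for part in parts)
--     )
-- ===== SOURCE B (Python) =====
-- def _looks_statewide_regulation_version(version: str) -> bool:
--     """Date-only release versions denote complete jurisdiction-wide regulation corpora."""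
--
--     return (
--         len(version) == 10
--         and version[4] == "-"
--         and version[7] == "-"
--         and version[:4].isdigit()
--         and version[5:7].isdigit()
--         and version[8:].isdigit()
--     )
-- ===== Notes on version B (the rewrite author's own statement) =====
-- stated objective: simpler
-- what changed: B drops the split: instead of building a 3-element parts list and checking each part's length, it checks len(version)==10, probes the two dash positions directly, and tests the three fixed slices with str.isdigit.
import Mathlib
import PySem

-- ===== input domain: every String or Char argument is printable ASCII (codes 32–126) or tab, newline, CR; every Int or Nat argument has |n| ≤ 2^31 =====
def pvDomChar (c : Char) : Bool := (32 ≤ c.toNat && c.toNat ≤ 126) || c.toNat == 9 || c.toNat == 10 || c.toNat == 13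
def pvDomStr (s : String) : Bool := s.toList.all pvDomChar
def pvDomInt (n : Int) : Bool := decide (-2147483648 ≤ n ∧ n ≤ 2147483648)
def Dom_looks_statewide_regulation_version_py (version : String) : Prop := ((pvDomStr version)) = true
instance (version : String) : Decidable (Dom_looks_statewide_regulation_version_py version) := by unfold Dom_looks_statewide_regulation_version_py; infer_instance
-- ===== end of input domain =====

-- B replaces A's split-into-parts check by direct probes of the two fixed dash positions and digit tests on the three fixed slices (objective: simpler).


-- ===== PORT A =====
-- parts = version.split("-"); split? is some because the separator "-" is nonempty, so .getD [] never fires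
def looks_statewide_regulation_version_py (version : String) : Bool :=
  let parts := (PySem.Str.split? version "-").getD []
  decide (parts.length = 3) &&
  decide (PySem.Str.len (parts.getD 0 "") = 4) &&
  decide (PySem.Str.len (parts.getD 1 "") = 2) &&
  decide (PySem.Str.len (parts.getD 2 "") = 2) &&
  parts.all (fun part => PySem.Str.strIsdigit part)

-- ===== PORT B =====
def looks_statewide_regulation_version_py_alt (version : String) : Bool :=
  decide (PySem.Str.len version = 10) &&
  decide (PySem.Str.pyGet? version 4 = some '-') &&
  decide (PySem.Str.pyGet? version 7 = some '-') &&
  PySem.Str.strIsdigit (PySem.Str.slice version none (some 4)) &&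
  PySem.Str.strIsdigit (PySem.Str.slice version (some 5) (some 7)) &&
  PySem.Str.strIsdigit (PySem.Str.slice version (some 8) none)

-- ===== PRECONDITION & SPEC =====
def Spec_looks_statewide_regulation_version_py (version : String) (out : Bool) : Prop := out = looks_statewide_regulation_version_py_alt version
instance (version : String) (out : Bool) : Decidable (Spec_looks_statewide_regulation_version_py version out) := by unfold Spec_looks_statewide_regulation_version_py; infer_instance

-- ===== CLAIM (what is proved, stated in full; the proofs are below) =====
def Claim_equal_looks_statewide_regulation_version_py : Prop := ∀ (version : String), Dom_looks_statewide_regulation_version_py version → Spec_looks_statewide_regulation_version_py version (looks_statewide_regulation_version_py version)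

-- ===== LEMMAS AND PROOFS =====

-- structural reference for splitting on '-' (proof-only helper)
def splitDash : List Char → List (List Char)
  | [] => [[]]
  | c :: rest =>
    if c = '-' then [] :: splitDash rest
    else
      match splitDash rest with
      | [] => [[c]]
      | p :: ps => (c :: p) :: ps

theorem splitDash_ne_nil (cs : List Char) : splitDash cs ≠ [] := by
  match cs with
  | [] => simp [splitDash]
  | c :: rest =>
    simp only [splitDash]
    split_ifs
    · simp
    · rcases h : splitDash rest with _ | ⟨p, ps⟩ <;> simp

theorem go_eq_splitDash : ∀ (l : List Char) (fuel : Nat) (cur : List Char) (acc : List (List Char)),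
    l.length ≤ fuel →
    PySem.Chars.splitOn.go ['-'] fuel l cur acc =
      acc.reverse ++ (cur.reverse ++ (splitDash l).headD []) :: (splitDash l).tail := by
  intro l
  induction l with
  | nil =>
    intro fuel cur acc _
    cases fuel <;> simp [PySem.Chars.splitOn.go, splitDash]
  | cons c rest ih =>
    intro fuel cur acc hle
    cases fuel with
    | zero => simp at hle
    | succ f =>
      by_cases hc : c = '-'
      · subst hc
        rw [show PySem.Chars.splitOn.go ['-'] (f+1) ('-' :: rest) cur acc =
              PySem.Chars.splitOn.go ['-'] f rest [] (cur.reverse :: acc) by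
            simp [PySem.Chars.splitOn.go, List.isPrefixOf]]
        rw [ih f [] (cur.reverse :: acc) (by simpa using hle)]
        rcases h : splitDash rest with _ | ⟨p, ps⟩
        · exact absurd h (splitDash_ne_nil rest)
        · simp [splitDash, h]
      · rw [show PySem.Chars.splitOn.go ['-'] (f+1) (c :: rest) cur acc =
              PySem.Chars.splitOn.go ['-'] f rest (c :: cur) acc by
            simp [PySem.Chars.splitOn.go, List.isPrefixOf, Ne.symm hc]]
        rw [ih f (c :: cur) acc (by simpa using hle)]
        rcases h : splitDash rest with _ | ⟨p, ps⟩
        · exact absurd h (splitDash_ne_nil rest)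
        · simp [splitDash, hc, h]

theorem splitOn_eq_splitDash (cs : List Char) : PySem.Chars.splitOn cs ['-'] = splitDash cs := by
  unfold PySem.Chars.splitOn
  rw [go_eq_splitDash cs (cs.length + 1) [] [] (by omega)]
  rcases h : splitDash cs with _ | ⟨p, ps⟩
  · exact absurd h (splitDash_ne_nil cs)
  · simp

-- joining the parts back with '-' (proof-only helper)
def joinDash : List (List Char) → List Char
  | [] => []
  | [p] => p
  | p :: q :: ps => p ++ '-' :: joinDash (q :: ps)

theorem joinDash_splitDash (cs : List Char) : joinDash (splitDash cs) = cs := by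
  induction cs with
  | nil => simp [splitDash, joinDash]
  | cons c rest ih =>
    by_cases hc : c = '-'
    · subst hc
      rcases h : splitDash rest with _ | ⟨q, qs⟩
      · exact absurd h (splitDash_ne_nil rest)
      · rw [h] at ih
        simp [splitDash, h, joinDash, ih]
    · rcases h : splitDash rest with _ | ⟨q, qs⟩
      · exact absurd h (splitDash_ne_nil rest)
      · rw [h] at ih
        rcases qs with _ | ⟨r, rs⟩
        · simp only [splitDash, if_neg hc, h, joinDash] at ih ⊢
          simp [ih]
        · simp only [splitDash, if_neg hc, h, joinDash] at ih ⊢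
          simp [ih]

theorem splitDash_no_dash (p : List Char) (h : '-' ∉ p) : splitDash p = [p] := by
  induction p with
  | nil => rfl
  | cons c rest ih =>
    have hc : c ≠ '-' := by intro hh; exact h (by simp [hh])
    have hr : '-' ∉ rest := by intro hh; exact h (by simp [hh])
    simp [splitDash, hc, ih hr]

theorem splitDash_append (p rest : List Char) (h : '-' ∉ p) :
    splitDash (p ++ '-' :: rest) = p :: splitDash rest := by
  induction p with
  | nil => simp [splitDash]
  | cons c q ih =>
    have hc : c ≠ '-' := by intro hh; exact h (by simp [hh])
    have hq : '-' ∉ q := by intro hh; exact h (by simp [hh])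
    rw [List.cons_append]
    simp only [splitDash, if_neg hc, ih hq]

theorem no_dash_of_digits (p : List Char) (h : PySem.Chars.strIsdigit p = true) : '-' ∉ p := by
  intro hmem
  simp only [PySem.Chars.strIsdigit, Bool.and_eq_true, List.all_eq_true] at h
  have := h.2 _ hmem
  simp [PySem.Chars.isdigit] at this

-- the key characterisation, on List Char
theorem key (cs : List Char) :
    ((splitDash cs).length = 3 ∧
     ((splitDash cs).getD 0 []).length = 4 ∧
     ((splitDash cs).getD 1 []).length = 2 ∧
     ((splitDash cs).getD 2 []).length = 2 ∧
     ∀ p ∈ splitDash cs, PySem.Chars.strIsdigit p = true) ↔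
    (cs.length = 10 ∧
     PySem.List.pyGet? cs 4 = some '-' ∧
     PySem.List.pyGet? cs 7 = some '-' ∧
     PySem.Chars.strIsdigit (cs.take 4) = true ∧
     PySem.Chars.strIsdigit ((cs.drop 5).take 2) = true ∧
     PySem.Chars.strIsdigit (cs.drop 8) = true) := by
  constructor
  · rintro ⟨h3, h0, h1, h2, hdig⟩
    rcases hsd : splitDash cs with _ | ⟨p0, rest⟩
    · exact absurd hsd (splitDash_ne_nil cs)
    rcases rest with _ | ⟨p1, rest⟩
    · rw [hsd] at h3; simp at h3
    rcases rest with _ | ⟨p2, rest⟩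
    · rw [hsd] at h3; simp at h3
    rcases rest with _ | ⟨p3, rest⟩
    swap
    · rw [hsd] at h3; simp at h3
    rw [hsd] at h0 h1 h2 hdig
    simp only [List.getD_cons_zero, List.getD_cons_succ] at h0 h1 h2
    have hcs : cs = p0 ++ '-' :: (p1 ++ '-' :: p2) := by
      have := joinDash_splitDash cs
      rw [hsd] at this
      simpa [joinDash] using this.symm
    subst hcs
    have hd0 : PySem.Chars.strIsdigit p0 = true := hdig p0 (by simp)
    have hd1 : PySem.Chars.strIsdigit p1 = true := hdig p1 (by simp)
    have hd2 : PySem.Chars.strIsdigit p2 = true := hdig p2 (by simp)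
    refine ⟨by simp [h0, h1, h2], ?_, ?_, ?_, ?_, ?_⟩
    · have := PySem.List.pyGet?_append_length p0 (p1 ++ '-' :: p2) '-'
      rwa [h0] at this
    · have := PySem.List.pyGet?_append_length (p0 ++ '-' :: p1) p2 '-'
      simp only [List.length_append, List.length_cons, h0, h1] at this
      norm_num at this
      simpa [List.append_assoc] using this
    · rw [List.take_left' h0]; exact hd0
    · have hcs5 : p0 ++ '-' :: (p1 ++ '-' :: p2) = (p0 ++ ['-']) ++ (p1 ++ '-' :: p2) := by simp
      rw [hcs5, List.drop_left' (by simp [h0]), List.take_left' h1]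
      exact hd1
    · have hcs8 : p0 ++ '-' :: (p1 ++ '-' :: p2) = ((p0 ++ ['-']) ++ (p1 ++ ['-'])) ++ p2 := by simp
      rw [hcs8, List.drop_left' (by simp [h0, h1])]
      exact hd2
  · rintro ⟨hlen, h4, h7, hd0, hd1, hd2⟩
    have hget4 : cs[4]'(by omega) = '-' := by
      rw [show (4:Int) = ((4:Nat):Int) from rfl, PySem.List.pyGet?_natCast,
        List.getElem?_eq_getElem (show (4:Nat) < cs.length by omega)] at h4
      simpa using h4
    have hget7 : cs[7]'(by omega) = '-' := by
      rw [show (7:Int) = ((7:Nat):Int) from rfl, PySem.List.pyGet?_natCast,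
        List.getElem?_eq_getElem (show (7:Nat) < cs.length by omega)] at h7
      simpa using h7
    have e1 : cs = cs.take 4 ++ cs.drop 4 := (List.take_append_drop 4 cs).symm
    have e2 : cs.drop 4 = '-' :: cs.drop 5 := by
      rw [← List.getElem_cons_drop (show 4 < cs.length by omega), hget4]
    have e3 : cs.drop 5 = (cs.drop 5).take 2 ++ cs.drop 7 := by
      have h := List.take_append_drop 2 (cs.drop 5)
      rw [List.drop_drop] at h
      exact h.symm
    have e4 : cs.drop 7 = '-' :: cs.drop 8 := by
      rw [← List.getElem_cons_drop (show 7 < cs.length by omega), hget7]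
    have hcs : cs = cs.take 4 ++ '-' :: ((cs.drop 5).take 2 ++ '-' :: cs.drop 8) := by
      conv_lhs => rw [e1, e2, e3, e4]
    have hn0 : '-' ∉ cs.take 4 := no_dash_of_digits _ hd0
    have hn1 : '-' ∉ (cs.drop 5).take 2 := no_dash_of_digits _ hd1
    have hn2 : '-' ∉ cs.drop 8 := no_dash_of_digits _ hd2
    have hsd : splitDash cs = [cs.take 4, (cs.drop 5).take 2, cs.drop 8] := by
      conv_lhs => rw [hcs]
      rw [splitDash_append _ _ hn0, splitDash_append _ _ hn1, splitDash_no_dash _ hn2]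
    rw [hsd]
    refine ⟨rfl, ?_, ?_, ?_, ?_⟩
    · simp [List.length_take, hlen]
    · simp [List.length_take, List.length_drop, hlen]
    · simp [List.length_drop, hlen]
    · intro p hp
      simp only [List.mem_cons, List.not_mem_nil, or_false] at hp
      rcases hp with rfl | rfl | rfl
      · exact hd0
      · exact hd1
      · exact hd2

-- ===== VERDICT (by name: the statement is the Claim_ definition above) =====
theorem looks_statewide_regulation_version_py_spec : Claim_equal_looks_statewide_regulation_version_py := by
  intro version _
  unfold Spec_looks_statewide_regulation_version_py looks_statewide_regulation_version_py looks_statewide_regulation_version_py_alt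
  have hsplit : (PySem.Str.split? version "-").getD [] = (splitDash version.toList).map String.ofList := by
    have hsep : ("-" : String).toList = ['-'] := by decide
    simp [PySem.Str.split?, PySem.Chars.split?, hsep, splitOn_eq_splitDash]
  rw [hsplit, Bool.eq_iff_iff]
  have hofLen : ∀ (i : Nat), PySem.Str.len (((splitDash version.toList).map String.ofList).getD i "") =
      (((splitDash version.toList).getD i []).length : Int) := by
    intro i
    rw [show ("" : String) = String.ofList [] from rfl, List.getD_map]
    simp [PySem.Str.len_eq]
  have hofl : ∀ j : List Char, (String.ofList j).toList = j := fun j => by simp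
  simp only [hofLen, Bool.and_eq_true, decide_eq_true_eq, List.all_eq_true, List.length_map,
    List.forall_mem_map, and_assoc, PySem.Str.strIsdigit_eq, PySem.Str.pyGet?_eq, PySem.Str.toList_slice,
    PySem.Str.len_eq, PySem.Chars.pyGet?_eq_listPyGet?, PySem.Chars.slice_eq_listSlice, hofl]
  rw [show PySem.List.slice version.toList none (some 4) = version.toList.take 4 by
        rw [PySem.List.slice_to _ (by norm_num)]; rfl,
      show PySem.List.slice version.toList (some 5) (some 7) = (version.toList.drop 5).take 2 by
        rw [PySem.List.slice_toNat _ (by norm_num) (by norm_num)]; rfl,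
      show PySem.List.slice version.toList (some 8) none = version.toList.drop 8 by
        rw [PySem.List.slice_from _ (by norm_num)]; rfl]
  have hk := key version.toList
  constructor
  · rintro ⟨a1, a2, a3, a4, a5⟩
    have := hk.mp ⟨by exact_mod_cast a1, by exact_mod_cast a2, by exact_mod_cast a3,
      by exact_mod_cast a4, fun p hp => a5 p hp⟩
    exact ⟨by exact_mod_cast this.1, this.2.1, this.2.2.1, this.2.2.2.1, this.2.2.2.2.1, this.2.2.2.2.2⟩
  · rintro ⟨b1, b2, b3, b4, b5, b6⟩
    have := hk.mpr ⟨by exact_mod_cast b1, b2, b3, b4, b5, b6⟩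
    exact ⟨by exact_mod_cast this.1, by exact_mod_cast this.2.1, by exact_mod_cast this.2.2.1,
      by exact_mod_cast this.2.2.2.1, fun p hp => this.2.2.2.2 p hp⟩
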